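-- pv_equiv track=rewrite | github.com/rslinford/Advent_of_Code_2015 | Day_11.py | has_increasing_straight_of_at_least_three
-- ===== SOURCE A (Python) =====
-- def has_increasing_straight_of_at_least_three(password):
--     prev_c = ''
--     consecutive = 1
--     for c in password:
--         if prev_c:
--             if ord(prev_c) + 1 == ord(c):
--                 consecutive += 1
--                 if consecutive >= 3:
--                     return True
--             else:
--                 consecutive = 1
--         prev_c = c
--     return False
-- ===== SOURCE B (Python) =====
-- def has_increasing_straight_of_at_least_three(password):
--     for i in range(len(password) - 2):
--         if ord(password[i]) + 1 == ord(password[i + 1]) and ord(password[i + 1]) + 1 == ord(password[i + 2]):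
--             return True
--     return False
-- ===== Notes on version B (the rewrite author's own statement) =====
-- stated objective: alternative
-- what changed: Replaced A's running-counter state machine (prev char + consecutive count, reset on break) with a stateless fixed-size sliding-window index loop testing each three-character window directly.
import Mathlib
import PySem

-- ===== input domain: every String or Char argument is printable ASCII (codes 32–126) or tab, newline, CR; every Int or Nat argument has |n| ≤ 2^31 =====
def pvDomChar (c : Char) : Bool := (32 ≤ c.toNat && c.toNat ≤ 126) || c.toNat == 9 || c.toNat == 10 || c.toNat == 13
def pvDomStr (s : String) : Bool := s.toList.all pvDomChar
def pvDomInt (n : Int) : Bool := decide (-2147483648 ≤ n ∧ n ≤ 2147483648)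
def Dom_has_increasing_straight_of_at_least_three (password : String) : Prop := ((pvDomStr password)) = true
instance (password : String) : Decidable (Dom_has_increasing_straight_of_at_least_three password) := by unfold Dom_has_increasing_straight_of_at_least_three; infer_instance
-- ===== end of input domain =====

-- B replaces A's running-counter state machine with a stateless sliding-window index loop (alternative decomposition, same cost).

-- ===== PORT A =====
-- loop over the characters, carrying prev_c (none models Python's initial '' ) and the consecutive counter
def pvGoA : List Char → Option Char → Int → Bool
  | [], _, _ => false
  | c :: rest, none, consecutive => pvGoA rest (some c) consecutive
  | c :: rest, some p, consecutive =>
      if p.toNat + 1 = c.toNat then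
        if consecutive + 1 ≥ 3 then true
        else pvGoA rest (some c) (consecutive + 1)
      else pvGoA rest (some c) 1

def has_increasing_straight_of_at_least_three (password : String) : Bool :=
  pvGoA password.toList none 1

-- ===== PORT B =====
-- password[i] etc.: indices drawn from range(len(password)-2) are always in range, so getD's default is never used
def pvTripleAt (s : List Char) (i : Nat) : Bool :=
  decide ((s.getD i ' ').toNat + 1 = (s.getD (i + 1) ' ').toNat) &&
  decide ((s.getD (i + 1) ' ').toNat + 1 = (s.getD (i + 2) ' ').toNat)

-- for i in range(len(password) - 2): early return on the first matching window
def pvGoB (s : List Char) : List Nat → Bool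
  | [] => false
  | i :: rest => if pvTripleAt s i then true else pvGoB s rest

def has_increasing_straight_of_at_least_three_alt (password : String) : Bool :=
  pvGoB password.toList (List.range (password.toList.length - 2))

-- ===== PRECONDITION & SPEC =====
def Spec_has_increasing_straight_of_at_least_three (password : String) (out : Bool) : Prop := out = has_increasing_straight_of_at_least_three_alt password
instance (password : String) (out : Bool) : Decidable (Spec_has_increasing_straight_of_at_least_three password out) := by unfold Spec_has_increasing_straight_of_at_least_three; infer_instance

-- ===== CLAIM (what is proved, stated in full; the proofs are below) =====
def Claim_equal_has_increasing_straight_of_at_least_three : Prop := ∀ (password : String), Dom_has_increasing_straight_of_at_least_three password → Spec_has_increasing_straight_of_at_least_three password (has_increasing_straight_of_at_least_three password)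

-- ===== LEMMAS AND PROOFS =====

-- proof-side middleman: the sliding window written as structural recursion on the list
def pvGoW : List Char → Bool
  | a :: b :: c :: r => if a.toNat + 1 = b.toNat ∧ b.toNat + 1 = c.toNat then true else pvGoW (b :: c :: r)
  | _ => false

lemma pvGoA_inv : ∀ (l : List Char) (p : Char),
    (pvGoA l (some p) 1 = pvGoW (p :: l)) ∧
    (∀ q : Char, q.toNat + 1 = p.toNat → pvGoA l (some p) 2 = pvGoW (q :: p :: l)) := by
  intro l
  induction l with
  | nil =>
    intro p
    refine ⟨by simp [pvGoA, pvGoW], ?_⟩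
    intro q _
    simp [pvGoA, pvGoW]
  | cons c rest ih =>
    intro p
    constructor
    · by_cases h : p.toNat + 1 = c.toNat
      · have h2 := (ih c).2 p h
        simp [pvGoA, h]
        exact h2
      · have h1 := (ih c).1
        cases rest with
        | nil => simp [pvGoA, pvGoW, h]
        | cons d r => simp [pvGoA, pvGoW, h]; simpa [pvGoW] using h1
    · intro q hq
      by_cases h : p.toNat + 1 = c.toNat
      · simp [pvGoA, pvGoW, h, hq]
      · have h1 := (ih c).1
        cases rest with
        | nil => simp [pvGoA, pvGoW, h]
        | cons d r =>
          simp [pvGoA, pvGoW, h]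
          simpa [pvGoW] using h1

lemma pvA_eq_goW (l : List Char) : pvGoA l none 1 = pvGoW l := by
  cases l with
  | nil => simp [pvGoA, pvGoW]
  | cons c rest => simpa [pvGoA] using (pvGoA_inv rest c).1

lemma pvTripleAt_cons (a : Char) (s : List Char) (i : Nat) :
    pvTripleAt (a :: s) (i + 1) = pvTripleAt s i := by
  simp [pvTripleAt]

lemma pvGoB_any (s : List Char) : ∀ idxs, pvGoB s idxs = idxs.any (pvTripleAt s) := by
  intro idxs
  induction idxs with
  | nil => simp [pvGoB]
  | cons i rest ih =>
    by_cases h : pvTripleAt s i = true <;> simp [pvGoB, h, ih]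

lemma pvGoW_any : ∀ s : List Char, pvGoW s = (List.range (s.length - 2)).any (pvTripleAt s) := by
  intro s
  match s with
  | [] => simp [pvGoW]
  | [a] => simp [pvGoW]
  | [a, b] => simp [pvGoW]
  | a :: b :: c :: r =>
    have ih := pvGoW_any (b :: c :: r)
    have hlen : (a :: b :: c :: r).length - 2 = (b :: c :: r).length - 2 + 1 := by
      simp
    rw [hlen, List.range_succ_eq_map]
    simp only [List.any_cons, List.any_map]
    have h0 : pvTripleAt (a :: b :: c :: r) 0 =
        decide (a.toNat + 1 = b.toNat ∧ b.toNat + 1 = c.toNat) := by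
      simp [pvTripleAt]
    have hcomp : ((List.range ((b :: c :: r).length - 2)).any fun i => pvTripleAt (a :: b :: c :: r) (i + 1))
        = (List.range ((b :: c :: r).length - 2)).any (pvTripleAt (b :: c :: r)) := by
      have hfun : (fun i => pvTripleAt (a :: b :: c :: r) (i + 1)) = pvTripleAt (b :: c :: r) :=
        funext (pvTripleAt_cons a (b :: c :: r))
      rw [hfun]
    by_cases h : a.toNat + 1 = b.toNat ∧ b.toNat + 1 = c.toNat
    · simp [pvGoW, h, h0]
    · simp only [pvGoW, if_neg h, h0, Function.comp_def, Nat.succ_eq_add_one]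
      rw [hcomp, ← ih]
      simp [h]

-- ===== VERDICT (by name: the statement is the Claim_ definition above) =====
theorem has_increasing_straight_of_at_least_three_spec : Claim_equal_has_increasing_straight_of_at_least_three := by
  intro password _
  unfold Spec_has_increasing_straight_of_at_least_three has_increasing_straight_of_at_least_three has_increasing_straight_of_at_least_three_alt
  rw [pvA_eq_goW, pvGoW_any, pvGoB_any]
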